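-- pv_equiv track=rewrite | github.com/AminHP/OCR-Site | polls/ocr.py | find_char_rect
-- ===== SOURCE A (Python) =====
-- def find_char_rect(raw_data):
--     start_x = None
--     end_x   = None
--     start_y = None
--     end_y   = None
--
--     for y in range(len(raw_data)):
--         if start_y == None and (sum(raw_data[y])) > 0:
--             start_y = y
--             break
--     for y in range(len(raw_data) - 1, -1, -1):
--         if end_y == None and sum(raw_data[y]) > 0:
--             end_y = y
--             break
--
--     for x in range(len(raw_data[0])):
--         _sum = 0
--         for y in range(len(raw_data)):
--             _sum += raw_data[y][x]
--
--         if start_x == None and _sum > 0: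
--             start_x = x
--             break
--     for x in range(len(raw_data[0]) - 1, -1, -1):
--         _sum = 0
--         for y in range(len(raw_data)):
--             _sum += raw_data[y][x]
--         if end_x == None and _sum > 0:
--             end_x = x
--             break
--
--     if start_x == None or end_x == None or start_y == None or end_y == None:
--         return ()
--     return (start_x, start_y, end_x - start_x, end_y - start_y)
-- ===== SOURCE B (Python) =====
-- def find_char_rect(raw_data):
--     width = len(raw_data[0])
--     row_sums = [sum(row) for row in raw_data]
--     col_sums = [0] * width
--     for row in raw_data:
--         col_sums = [s + row[x] for x, s in enumerate(col_sums)]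
--     ys = [y for y, s in enumerate(row_sums) if s > 0]
--     xs = [x for x, s in enumerate(col_sums) if s > 0]
--     if not xs or not ys:
--         return ()
--     return (xs[0], ys[0], xs[-1] - xs[0], ys[-1] - ys[0])
-- ===== Notes on version B (the rewrite author's own statement) =====
-- stated objective: alternative
-- what changed: Replaces A's four directional early-break scans (with a nested per-column re-summation for each probed column) by one pass building row-sum and column-sum tables, then picking the first/last positive index of each table.
import Mathlib
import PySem

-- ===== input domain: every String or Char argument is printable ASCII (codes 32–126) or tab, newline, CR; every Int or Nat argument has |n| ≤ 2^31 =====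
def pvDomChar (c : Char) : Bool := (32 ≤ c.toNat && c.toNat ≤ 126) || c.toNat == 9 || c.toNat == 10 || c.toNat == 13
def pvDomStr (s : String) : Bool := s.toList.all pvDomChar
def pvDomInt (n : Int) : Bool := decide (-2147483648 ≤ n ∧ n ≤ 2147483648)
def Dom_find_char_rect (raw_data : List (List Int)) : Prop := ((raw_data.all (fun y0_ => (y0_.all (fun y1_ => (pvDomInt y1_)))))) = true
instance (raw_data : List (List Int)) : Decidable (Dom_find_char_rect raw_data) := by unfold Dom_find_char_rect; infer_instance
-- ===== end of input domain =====

set_option maxRecDepth 8000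


-- B replaces A's four directional early-break scans by one pass building row-sum and
-- column-sum tables, then picking the first/last positive index of each table (alternative decomposition).

-- ===== PORT A =====
-- first y in idxs whose row sum is positive (the 'for … if …: break' loops of A)
def pvScanRow (rows : List (List Int)) : List Int → Option Int
  | [] => none
  | y :: rest =>
    if 0 < (PySem.List.pyGetD rows y []).sum then some y else pvScanRow rows rest

-- A's inner loop: _sum = 0; for y in range(len(raw_data)): _sum += raw_data[y][x]
def pvColSumA (rows : List (List Int)) (x : Int) : Int :=
  (PySem.List.pyRange 0 (rows.length : Int) 1).foldl
    (fun s y => s + PySem.List.pyGetD (PySem.List.pyGetD rows y []) x 0) 0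

-- first x in idxs whose column sum is positive
def pvScanCol (rows : List (List Int)) : List Int → Option Int
  | [] => none
  | x :: rest =>
    if 0 < pvColSumA rows x then some x else pvScanCol rows rest

def find_char_rect (raw_data : List (List Int)) : List Int :=
  let n : Int := raw_data.length
  let start_y := pvScanRow raw_data (PySem.List.pyRange 0 n 1)
  let end_y := pvScanRow raw_data (PySem.List.pyRange (n - 1) (-1) (-1))
  let w : Int := (PySem.List.pyGetD raw_data 0 []).length
  let start_x := pvScanCol raw_data (PySem.List.pyRange 0 w 1)
  let end_x := pvScanCol raw_data (PySem.List.pyRange (w - 1) (-1) (-1))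
  match start_x, end_x, start_y, end_y with
  | some sx, some ex, some sy, some ey => [sx, sy, ex - sx, ey - sy]
  | _, _, _, _ => []

-- ===== PORT B =====
-- col_sums = [s + row[x] for x, s in enumerate(col_sums)]
def pvStepCols (acc : List Int) (row : List Int) : List Int :=
  (PySem.List.enumerate acc 0).map (fun p => p.2 + PySem.List.pyGetD row p.1 0)

-- [i for i, s in enumerate(sums) if s > 0]
def pvPosIdx (sums : List Int) : List Int :=
  ((PySem.List.enumerate sums 0).filter (fun p => decide (0 < p.2))).map (fun p => p.1)

def find_char_rect_alt (raw_data : List (List Int)) : List Int :=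
  let w := (PySem.List.pyGetD raw_data 0 []).length
  let rowSums := raw_data.map (fun row => row.sum)
  let colSums := raw_data.foldl pvStepCols (List.replicate w 0)
  let ys := pvPosIdx rowSums
  let xs := pvPosIdx colSums
  match xs, ys with
  | x0 :: xt, y0 :: yt =>
    [x0, y0, (x0 :: xt).getLastD 0 - x0, (y0 :: yt).getLastD 0 - y0]
  | _, _ => []

-- ===== PRECONDITION & SPEC =====
-- Pre_ excludes exactly the inputs where Python A raises (IndexError): the empty list
-- (len(raw_data[0])) and grids with a row shorter than the first row (raw_data[y][x]).
def Pre_find_char_rect (raw_data : List (List Int)) : Prop :=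
  raw_data ≠ [] ∧ ∀ row ∈ raw_data, (raw_data.headD []).length ≤ row.length
instance (raw_data : List (List Int)) : Decidable (Pre_find_char_rect raw_data) := by
  unfold Pre_find_char_rect; infer_instance
def pvWitness_find_char_rect : List (List Int) := [[0, 1], [0, 0]]

def Spec_find_char_rect (raw_data : List (List Int)) (out : List Int) : Prop :=
  out = find_char_rect_alt raw_data
instance (raw_data : List (List Int)) (out : List Int) : Decidable (Spec_find_char_rect raw_data out) := by
  unfold Spec_find_char_rect; infer_instance

-- ===== CLAIM (what is proved, stated in full; the proofs are below) =====
def Claim_equal_find_char_rect : Prop := ∀ (raw_data : List (List Int)), Dom_find_char_rect raw_data → Pre_find_char_rect raw_data → Spec_find_char_rect raw_data (find_char_rect raw_data)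

-- ===== LEMMAS AND PROOFS =====

theorem pvScanRow_eq_find? (rows : List (List Int)) (idxs : List Int) :
    pvScanRow rows idxs = idxs.find? (fun y => decide (0 < (PySem.List.pyGetD rows y []).sum)) := by
  induction idxs with
  | nil => rfl
  | cons y rest ih =>
    by_cases h : 0 < (PySem.List.pyGetD rows y []).sum
    · rw [pvScanRow, if_pos h, List.find?_cons_of_pos (by simpa using h)]
    · rw [pvScanRow, if_neg h, List.find?_cons_of_neg (by simpa using h)]; exact ih

theorem pvScanCol_eq_find? (rows : List (List Int)) (idxs : List Int) :
    pvScanCol rows idxs = idxs.find? (fun x => decide (0 < pvColSumA rows x)) := by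
  induction idxs with
  | nil => rfl
  | cons x rest ih =>
    by_cases h : 0 < pvColSumA rows x
    · rw [pvScanCol, if_pos h, List.find?_cons_of_pos (by simpa using h)]
    · rw [pvScanCol, if_neg h, List.find?_cons_of_neg (by simpa using h)]; exact ih

theorem find?_eq_head?_filter {α : Type} (p : α → Bool) (l : List α) :
    l.find? p = (l.filter p).head? := by
  induction l with
  | nil => rfl
  | cons a t ih =>
    by_cases h : p a = true
    · rw [List.find?_cons_of_pos h, List.filter_cons, if_pos h]; rfl
    · rw [List.find?_cons_of_neg h, List.filter_cons, if_neg h]; exact ih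

theorem find?_reverse_eq_getLast?_filter {α : Type} (p : α → Bool) (l : List α) :
    l.reverse.find? p = (l.filter p).getLast? := by
  rw [find?_eq_head?_filter, List.filter_reverse, List.head?_reverse]

theorem pyRange_countdown (n : Int) :
    PySem.List.pyRange (n - 1) (-1) (-1) = (PySem.List.pyRange 0 n 1).reverse := by
  rw [PySem.List.pyRange_neg_one_eq_reverse]
  norm_num

-- the column sum of A as a map-sum
theorem pvColSumA_eq_sum (rows : List (List Int)) (x : Int) :
    pvColSumA rows x = (rows.map (fun row => PySem.List.pyGetD row x 0)).sum := by
  unfold pvColSumA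
  rw [PySem.List.foldl_pyRange_zero_pyGetD' rows [] (fun s row => s + PySem.List.pyGetD row x 0) 0]
  rw [PySem.List.foldl_add]
  simp

theorem pvPosIdx_eq_filter (sums : List Int) :
    pvPosIdx sums = (PySem.List.pyRange 0 (sums.length : Int) 1).filter
      (fun j => decide (0 < PySem.List.pyGetD sums j 0)) := by
  unfold pvPosIdx
  rw [PySem.List.enumerate_eq_map_pyRange (d := 0)]
  rw [List.filter_map, List.map_map]
  simp [Function.comp_def]

theorem pvStepCols_length (acc row : List Int) : (pvStepCols acc row).length = acc.length := by
  simp [pvStepCols, PySem.List.length_enumerate]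

theorem pvStepCols_get (acc row : List Int) (j : Nat) (hj : j < acc.length) :
    (pvStepCols acc row)[j]'(by rw [pvStepCols_length]; exact hj)
      = acc[j] + PySem.List.pyGetD row (j : Int) 0 := by
  simp [pvStepCols, PySem.List.getElem_enumerate]

theorem foldl_pvStepCols_length (rows : List (List Int)) :
    ∀ acc : List Int, (rows.foldl pvStepCols acc).length = acc.length := by
  induction rows with
  | nil => intro acc; rfl
  | cons r rs ih =>
    intro acc
    simp only [List.foldl_cons]
    rw [ih, pvStepCols_length]

theorem foldl_pvStepCols_get (rows : List (List Int)) :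
    ∀ (acc : List Int) (j : Nat) (hj : j < acc.length),
      (rows.foldl pvStepCols acc)[j]'(by rw [foldl_pvStepCols_length]; exact hj)
        = acc[j] + (rows.map (fun row => PySem.List.pyGetD row (j : Int) 0)).sum := by
  induction rows with
  | nil => intro acc j hj; simp
  | cons r rs ih =>
    intro acc j hj
    simp only [List.foldl_cons]
    rw [ih (pvStepCols acc r) j (by rw [pvStepCols_length]; exact hj)]
    rw [pvStepCols_get acc r j hj]
    simp [add_assoc]

theorem getLast?_cons_eq_getLastD {α : Type} [Inhabited α] (x : α) (t : List α) (d : α) :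
    (x :: t).getLast? = some ((x :: t).getLastD d) := by
  rw [List.getLastD_eq_getLast?]
  cases h : (x :: t).getLast? with
  | none => simp at h
  | some v => rfl

-- the two ports agree on every input (Pre_ is only needed for Python A, which raises outside it)
theorem ports_agree (rows : List (List Int)) : find_char_rect rows = find_char_rect_alt rows := by
  unfold find_char_rect find_char_rect_alt
  simp only [pvScanRow_eq_find?, pvScanCol_eq_find?, pyRange_countdown,
    find?_reverse_eq_getLast?_filter]
  simp only [find?_eq_head?_filter]
  -- reduce B's index lists to the same filtered ranges
  have hy : pvPosIdx (rows.map (fun row => row.sum))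
      = (PySem.List.pyRange 0 (rows.length : Int) 1).filter
          (fun y => decide (0 < (PySem.List.pyGetD rows y []).sum)) := by
    rw [pvPosIdx_eq_filter]
    simp only [List.length_map]
    apply List.filter_congr
    intro j hj
    rw [PySem.List.mem_pyRange_one] at hj
    have h0 : 0 ≤ j := hj.1
    have hlt : j.toNat < rows.length := by omega
    rw [PySem.List.pyGetD_eq_getElem _ _ h0 (by simpa using hj.2),
        PySem.List.pyGetD_eq_getElem _ _ h0 hj.2]
    simp
  have hx : pvPosIdx (rows.foldl pvStepCols
        (List.replicate (PySem.List.pyGetD rows 0 []).length 0))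
      = (PySem.List.pyRange 0 ((PySem.List.pyGetD rows 0 []).length : Int) 1).filter
          (fun x => decide (0 < pvColSumA rows x)) := by
    rw [pvPosIdx_eq_filter]
    have hlen : (rows.foldl pvStepCols
        (List.replicate (PySem.List.pyGetD rows 0 []).length 0)).length
        = (PySem.List.pyGetD rows 0 []).length := by
      rw [foldl_pvStepCols_length]; simp
    rw [hlen]
    apply List.filter_congr
    intro j hj
    rw [PySem.List.mem_pyRange_one] at hj
    have h0 : 0 ≤ j := hj.1
    have hlt : j < (rows.foldl pvStepCols
        (List.replicate (PySem.List.pyGetD rows 0 []).length 0)).length := by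
      rw [hlen]; exact_mod_cast hj.2
    rw [PySem.List.pyGetD_eq_getElem _ _ h0 (by exact_mod_cast hlt)]
    have hjr : j.toNat < (List.replicate (PySem.List.pyGetD rows 0 []).length (0 : Int)).length := by
      simp; omega
    rw [foldl_pvStepCols_get rows _ j.toNat hjr]
    rw [pvColSumA_eq_sum]
    have : ((j.toNat : Int)) = j := by omega
    simp [this]
  simp only [hy, hx]
  generalize (PySem.List.pyRange 0 ((PySem.List.pyGetD rows 0 []).length : Int) 1).filter
      (fun x => decide (0 < pvColSumA rows x)) = Fx
  generalize (PySem.List.pyRange 0 (rows.length : Int) 1).filter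
      (fun y => decide (0 < (PySem.List.pyGetD rows y []).sum)) = Fy
  cases Fx with
  | nil => cases Fy <;> simp
  | cons x0 xt =>
    cases Fy with
    | nil => simp
    | cons y0 yt =>
      rw [getLast?_cons_eq_getLastD x0 xt 0, getLast?_cons_eq_getLastD y0 yt 0]
      rfl

-- ===== VERDICT (by name: the statement is the Claim_ definition above) =====
theorem find_char_rect_spec : Claim_equal_find_char_rect := by
  intro raw_data _ _
  unfold Spec_find_char_rect
  exact ports_agree raw_data
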